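-- pv_equiv track=rewrite | github.com/nikolalogan/xafgs | ocr-service/app/providers/local_pp_structure.py | _guess_suffix
-- ===== SOURCE A (Python) =====
-- def _guess_suffix(file_name: str, mime_type: str) -> str:
--     if _is_pdf(file_name, mime_type):
--         return ".pdf"
--     name = (file_name or "").lower()
--     for suffix in [".png", ".jpg", ".jpeg", ".bmp", ".tif", ".tiff", ".webp"]:
--         if name.endswith(suffix):
--             return suffix
--     mime = (mime_type or "").lower()
--     if "png" in mime:
--         return ".png"
--     if "jpeg" in mime or "jpg" in mime:
--         return ".jpg"
--     return ".bin"
--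
-- def _is_pdf(file_name: str, mime_type: str) -> bool:
--     return (mime_type or "").lower() == "application/pdf" or (file_name or "").lower().endswith(".pdf")
-- ===== SOURCE B (Python) =====
-- _IMAGE_EXTS = frozenset({".png", ".jpg", ".jpeg", ".bmp", ".tif", ".tiff", ".webp"})
--
-- def _guess_suffix(file_name: str, mime_type: str) -> str:
--     if (mime_type or "").lower() == "application/pdf" or (file_name or "").lower().endswith(".pdf"):
--         return ".pdf"
--     name = (file_name or "").lower()
--     i = name.rfind(".")
--     if i >= 0:
--         ext = name[i:]
--         if ext in _IMAGE_EXTS: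
--             return ext
--     mime = (mime_type or "").lower()
--     if "png" in mime:
--         return ".png"
--     if "jpeg" in mime or "jpg" in mime:
--         return ".jpg"
--     return ".bin"
-- ===== Notes on version B (the rewrite author's own statement) =====
-- stated objective: simpler
-- what changed: Instead of scanning seven endswith checks in order, B extracts the file's extension once (rfind of the last dot, then a slice) and does a single frozenset membership test; the pdf guard and mime fallbacks are unchanged.
import Mathlib
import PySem

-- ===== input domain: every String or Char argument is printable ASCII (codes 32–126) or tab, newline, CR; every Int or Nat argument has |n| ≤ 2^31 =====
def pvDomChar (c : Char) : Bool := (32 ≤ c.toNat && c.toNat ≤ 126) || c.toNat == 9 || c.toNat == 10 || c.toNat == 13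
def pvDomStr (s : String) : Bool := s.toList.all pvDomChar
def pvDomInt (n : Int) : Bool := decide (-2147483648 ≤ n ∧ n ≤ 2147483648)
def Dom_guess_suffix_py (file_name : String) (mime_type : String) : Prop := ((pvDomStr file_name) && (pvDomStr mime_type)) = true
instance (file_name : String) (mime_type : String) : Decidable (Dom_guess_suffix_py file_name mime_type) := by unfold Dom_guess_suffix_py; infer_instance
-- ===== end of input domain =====

-- B replaces A's ordered scan of seven endswith checks by extracting the extension once
-- (last-dot rfind + slice) and one set-membership test; objective: simpler.


-- ===== PORT A =====
-- helper _is_pdf; '(s or "")' is the identity on strings (the empty string maps to "")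
def is_pdf_py (file_name : String) (mime_type : String) : Bool :=
  (PySem.Str.lower mime_type == "application/pdf") ||
    PySem.Str.endswith (PySem.Str.lower file_name) ".pdf"

def guess_suffix_py (file_name : String) (mime_type : String) : String :=
  if is_pdf_py file_name mime_type then ".pdf"
  else
    let name := PySem.Str.lower file_name
    -- the for-loop with early return: first suffix of the literal list that name ends with
    match ([".png", ".jpg", ".jpeg", ".bmp", ".tif", ".tiff", ".webp"] : List String).find?
        (fun suffix => PySem.Str.endswith name suffix) with
    | some suffix => suffix
    | none =>
      let mime := PySem.Str.lower mime_type
      if PySem.Str.isIn "png" mime then ".png"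
      else if PySem.Str.isIn "jpeg" mime || PySem.Str.isIn "jpg" mime then ".jpg"
      else ".bin"

-- ===== PORT B =====
-- the frozenset of the seven image suffixes (distinct literals, kept as their distinct-element list)
def pvImageExts : List String := [".png", ".jpg", ".jpeg", ".bmp", ".tif", ".tiff", ".webp"]

def guess_suffix_py_alt (file_name : String) (mime_type : String) : String :=
  if (PySem.Str.lower mime_type == "application/pdf") ||
      PySem.Str.endswith (PySem.Str.lower file_name) ".pdf" then ".pdf"
  else
    let name := PySem.Str.lower file_name
    let i := PySem.Str.rfind name "."
    let extFound : Option String :=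
      if 0 ≤ i then
        let ext := PySem.Str.slice name (some i) none   -- name[i:]
        if pvImageExts.contains ext then some ext else none
      else none
    match extFound with
    | some ext => ext
    | none =>
      let mime := PySem.Str.lower mime_type
      if PySem.Str.isIn "png" mime then ".png"
      else if PySem.Str.isIn "jpeg" mime || PySem.Str.isIn "jpg" mime then ".jpg"
      else ".bin"

-- ===== PRECONDITION & SPEC =====
def Spec_guess_suffix_py (file_name : String) (mime_type : String) (out : String) : Prop := out = guess_suffix_py_alt file_name mime_type
instance (file_name : String) (mime_type : String) (out : String) : Decidable (Spec_guess_suffix_py file_name mime_type out) := by unfold Spec_guess_suffix_py; infer_instance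

-- ===== CLAIM (what is proved, stated in full; the proofs are below) =====
def Claim_equal_guess_suffix_py : Prop := ∀ (file_name : String) (mime_type : String), Dom_guess_suffix_py file_name mime_type → Spec_guess_suffix_py file_name mime_type (guess_suffix_py file_name mime_type)

-- ===== LEMMAS AND PROOFS =====

-- ['.'] is a prefix of xs iff xs starts with '.'
lemma isPrefixOf_dot (xs : List Char) : (['.'].isPrefixOf xs = true) ↔ xs.head? = some '.' := by
  cases xs with
  | nil => simp [List.isPrefixOf]
  | cons a t =>
    simp only [List.isPrefixOf_iff_prefix, List.cons_prefix_cons, List.nil_prefix, and_true,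
      List.head?_cons, Option.some.injEq]
    exact eq_comm


-- rfind.go for the single-character needle '.' : either -1 and no dot up to n, or the last dot index ≤ n
lemma go_dot_spec (s : List Char) (n : Nat) :
    (PySem.Chars.rfind.go s ['.'] n = -1 ∧ ∀ j ≤ n, s[j]? ≠ some '.') ∨
    (∃ j : Nat, j ≤ n ∧ PySem.Chars.rfind.go s ['.'] n = (j : Int) ∧ s[j]? = some '.' ∧
      ∀ i, j < i → i ≤ n → s[i]? ≠ some '.') := by
  induction n with
  | zero =>
    by_cases h : s[0]? = some '.'
    · right
      refine ⟨0, le_refl _, ?_, h, by omega⟩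
      show (if (['.'].isPrefixOf s) = true then (0 : Int) else -1) = 0
      rw [if_pos]
      rw [isPrefixOf_dot, List.head?_eq_getElem?]
      simpa using h
    · left
      constructor
      · show (if (['.'].isPrefixOf s) = true then (0 : Int) else -1) = -1
        rw [if_neg]
        rw [isPrefixOf_dot, List.head?_eq_getElem?]
        simpa using h
      · intro j hj
        interval_cases j
        exact h
  | succ m ih =>
    have hgo : PySem.Chars.rfind.go s ['.'] (m + 1) =
        if ['.'].isPrefixOf (List.drop (m + 1) s) = true then ((m + 1 : Nat) : Int)
        else PySem.Chars.rfind.go s ['.'] m := rfl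
    by_cases h : s[m + 1]? = some '.'
    · right
      refine ⟨m + 1, le_refl _, ?_, h, by omega⟩
      rw [hgo, if_pos]
      rw [isPrefixOf_dot, List.head?_drop]
      exact h
    · have hne : (['.'].isPrefixOf (List.drop (m + 1) s)) ≠ true := by
        simp only [ne_eq, isPrefixOf_dot, List.head?_drop]
        exact h
      rw [hgo, if_neg hne]
      rcases ih with ⟨h1, h2⟩ | ⟨j, hjm, hj1, hj2, hj3⟩
      · left
        refine ⟨h1, fun j hj => ?_⟩
        by_cases hjm : j ≤ m
        · exact h2 j hjm
        · have : j = m + 1 := by omega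
          rw [this]; exact h
      · right
        refine ⟨j, by omega, hj1, hj2, fun i hi1 hi2 => ?_⟩
        by_cases him : i ≤ m
        · exact hj3 i hi1 him
        · have : i = m + 1 := by omega
          rw [this]; exact h

-- rfind s "." : the -1 case means no dot at all
lemma rfind_dot_neg (s : List Char) (h : ¬ 0 ≤ PySem.Chars.rfind s ['.']) :
    ∀ j : Nat, s[j]? ≠ some '.' := by
  rcases go_dot_spec s s.length with ⟨_, h2⟩ | ⟨j, _, hj1, hj2, _⟩
  · intro j
    by_cases hj : j ≤ s.length
    · exact h2 j hj
    · intro hc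
      rw [List.getElem?_eq_none (l := s) (by omega : s.length ≤ j)] at hc
      simp at hc
  · intro i hc
    have hr : PySem.Chars.rfind s ['.'] = PySem.Chars.rfind.go s ['.'] s.length := rfl
    rw [hr, hj1] at h
    exact h (Int.natCast_nonneg j)

-- rfind s "." : the nonnegative case returns the LAST dot index
lemma rfind_dot_pos (s : List Char) (h : 0 ≤ PySem.Chars.rfind s ['.']) :
    ∃ j : Nat, PySem.Chars.rfind s ['.'] = (j : Int) ∧ s[j]? = some '.' ∧
      ∀ i, j < i → s[i]? ≠ some '.' := by
  have hr : PySem.Chars.rfind s ['.'] = PySem.Chars.rfind.go s ['.'] s.length := rfl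
  rcases go_dot_spec s s.length with ⟨h1, _⟩ | ⟨j, hjm, hj1, hj2, hj3⟩
  · rw [hr, h1] at h; norm_num at h
  · refine ⟨j, hr.trans hj1, hj2, fun i hi => ?_⟩
    by_cases him : i ≤ s.length
    · exact hj3 i hi him
    · intro hc
      rw [List.getElem?_eq_none (l := s) (by omega : s.length ≤ i)] at hc
      simp at hc

-- a suffix starting with '.' puts a dot into the list
lemma suffix_dot_mem (cs t : List Char) (hs : ('.' :: t) <:+ cs) :
    ∃ m : Nat, cs[m]? = some '.' := by
  obtain ⟨p, hp⟩ := hs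
  refine ⟨p.length, ?_⟩
  rw [← hp, List.getElem?_append_right (le_refl _)]
  simp

-- uniqueness: if cs ends in '.'::t with t dot-free, the tail after the LAST dot is exactly '.'::t
lemma lastdot_unique (cs t : List Char) (j : Nat)
    (hj : cs[j]? = some '.') (hlast : ∀ i, j < i → cs[i]? ≠ some '.')
    (hs : ('.' :: t) <:+ cs) (ht : '.' ∉ t) :
    List.drop j cs = '.' :: t := by
  obtain ⟨p, hp⟩ := hs
  have hm : cs[p.length]? = some '.' := by
    rw [← hp, List.getElem?_append_right (le_refl _)]
    simp
  have hjm : j = p.length := by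
    rcases lt_trichotomy j p.length with hlt | heq | hgt
    · exact absurd hm (hlast p.length hlt)
    · exact heq
    · -- cs[j] lies inside t, which is dot-free
      exfalso
      have hjl : j < cs.length := by
        by_contra hge
        rw [List.getElem?_eq_none (by omega : cs.length ≤ j)] at hj
        simp at hj
      have : cs[j]? = ('.' :: t)[j - p.length]? := by
        rw [← hp, List.getElem?_append_right (by omega : p.length ≤ j)]
      rw [this] at hj
      have hpos : 0 < j - p.length := by omega
      have : t[j - p.length - 1]? = some '.' := by
        cases hjp : j - p.length with
        | zero => omega
        | succ k => rw [hjp] at hj; simpa using hj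
      exact ht (List.mem_of_getElem? this)
  rw [hjm, ← hp, List.drop_left]

-- find? returns the unique element satisfying the predicate
lemma find?_eq_some_of_unique {α : Type} {p : α → Bool} {l : List α} {a : α}
    (ha : a ∈ l) (hpa : p a = true) (hu : ∀ b ∈ l, p b = true → b = a) :
    l.find? p = some a := by
  induction l with
  | nil => cases ha
  | cons x xs ih =>
    by_cases hx : p x = true
    · rw [List.find?_cons_of_pos hx, hu x List.mem_cons_self hx]
    · rw [List.find?_cons_of_neg hx]
      rcases List.mem_cons.mp ha with rfl | hmem
      · exact absurd hpa hx
      · exact ih hmem (fun b hb => hu b (List.mem_cons_of_mem x hb))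

-- the central lemma: A's ordered endswith scan equals B's last-dot extension lookup
lemma core (name : String) :
    ([".png", ".jpg", ".jpeg", ".bmp", ".tif", ".tiff", ".webp"] : List String).find?
        (fun suffix => PySem.Str.endswith name suffix) =
    (if 0 ≤ PySem.Str.rfind name "." then
       (if pvImageExts.contains (PySem.Str.slice name (some (PySem.Str.rfind name ".")) none) then
          some (PySem.Str.slice name (some (PySem.Str.rfind name ".")) none)
        else none)
     else none) := by
  have hdot : (".": String).toList = ['.'] := rfl
  by_cases h : 0 ≤ PySem.Str.rfind name "."
  · rw [if_pos h]
    rw [PySem.Str.rfind_eq, hdot] at h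
    obtain ⟨j, hjeq, hjd, hjlast⟩ := rfind_dot_pos name.toList h
    set ext := PySem.Str.slice name (some (PySem.Str.rfind name ".")) none with hext
    have hextL : ext.toList = List.drop j name.toList := by
      rw [hext, PySem.Str.toList_slice, PySem.Chars.slice_eq_listSlice,
        PySem.Str.rfind_eq, hdot, hjeq, PySem.List.slice_from _ (Int.natCast_nonneg j)]
      simp
    -- ext starts with '.' and its tail is exactly everything after the last dot
    have hdropj : List.drop j name.toList = '.' :: List.drop (j + 1) name.toList := by
      have hjl : j < name.toList.length := by
        by_contra hge
        rw [List.getElem?_eq_none (by omega : name.toList.length ≤ j)] at hjd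
        simp at hjd
      rw [List.drop_eq_getElem_cons hjl]
      congr 1
      have := hjd
      rw [List.getElem?_eq_getElem hjl] at this
      exact Option.some.injEq _ _ ▸ (by simpa using this)
    -- key: any list suffix '.'::t (t dot-free) that name ends with IS ext
    have key : ∀ (e : String) (t : List Char), e.toList = '.' :: t → '.' ∉ t →
        PySem.Str.endswith name e = true → e = ext := by
      intro e t het htd hew
      rw [PySem.Str.endswith_eq, PySem.Chars.endswith_iff, het] at hew
      have := lastdot_unique name.toList t j hjd hjlast hew htd
      apply String.toList_inj.mp
      rw [hextL, this, het]
    by_cases hc : pvImageExts.contains ext = true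
    · rw [if_pos hc]
      have hmem : ext ∈ pvImageExts := by
        rwa [List.contains_iff_mem] at hc
      apply find?_eq_some_of_unique (a := ext)
      · exact hmem
      · -- name ends with ext: drop j is a suffix
        rw [PySem.Str.endswith_eq, PySem.Chars.endswith_iff, hextL]
        exact List.drop_suffix j name.toList
      · intro b hb hpb
        fin_cases hb <;>
          [ exact key _ "png".toList rfl (by decide) hpb;
            exact key _ "jpg".toList rfl (by decide) hpb;
            exact key _ "jpeg".toList rfl (by decide) hpb;
            exact key _ "bmp".toList rfl (by decide) hpb;
            exact key _ "tif".toList rfl (by decide) hpb;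
            exact key _ "tiff".toList rfl (by decide) hpb;
            exact key _ "webp".toList rfl (by decide) hpb ]
    · rw [if_neg hc]
      rw [List.find?_eq_none]
      intro b hb hpb
      apply hc
      have hbe : b = ext := by
        fin_cases hb <;>
          [ exact key _ "png".toList rfl (by decide) hpb;
            exact key _ "jpg".toList rfl (by decide) hpb;
            exact key _ "jpeg".toList rfl (by decide) hpb;
            exact key _ "bmp".toList rfl (by decide) hpb;
            exact key _ "tif".toList rfl (by decide) hpb;
            exact key _ "tiff".toList rfl (by decide) hpb;
            exact key _ "webp".toList rfl (by decide) hpb ]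
      rw [← hbe]
      rw [List.contains_iff_mem]
      exact hb
  · rw [if_neg h]
    rw [PySem.Str.rfind_eq, hdot] at h
    have hnod := rfind_dot_neg name.toList h
    rw [List.find?_eq_none]
    intro b hb hpb
    have : ∃ t : List Char, b.toList = '.' :: t := by
      fin_cases hb <;> exact ⟨_, rfl⟩
    obtain ⟨t, hbt⟩ := this
    rw [PySem.Str.endswith_eq, PySem.Chars.endswith_iff, hbt] at hpb
    obtain ⟨m, hm⟩ := suffix_dot_mem name.toList t hpb
    exact hnod m hm

-- ===== VERDICT (by name: the statement is the Claim_ definition above) =====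
theorem guess_suffix_py_spec : Claim_equal_guess_suffix_py := by
  intro file_name mime_type _
  unfold Spec_guess_suffix_py
  simp only [guess_suffix_py, guess_suffix_py_alt, is_pdf_py, core]
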